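-- pv_equiv track=rewrite | github.com/hoadm-net/factchecking | analyze_beam_sentences.py | analyze_path_patterns
-- ===== SOURCE A (Python) =====
-- from collections import defaultdict
-- from typing import Dict, List, Tuple, Optional
--
-- def analyze_path_patterns(beam_results: List[Dict]) -> Dict[str, Dict]:
--     """Analyze common patterns in paths with enhanced pattern recognition"""
--     patterns = defaultdict(int)
--     detailed_patterns = defaultdict(int)
--
--     for result in beam_results:
--         for path in result.get('paths', []):
--             nodes = path.get('nodes', [])
--
--             # Basic node type sequence
--             node_types = []
--             for node in nodes:
--                 if node.startswith('claim'):
--                     node_types.append('C')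
--                 elif node.startswith('word_'):
--                     node_types.append('W')
--                 elif node.startswith('sentence_'):
--                     node_types.append('S')
--                 elif node.startswith('entity_'):
--                     node_types.append('E')
--                 else:
--                     node_types.append('?')
--
--             # Create pattern string
--             pattern = '->'.join(node_types)
--             patterns[pattern] += 1
--
--             # Detailed pattern with path success
--             reaches_sentence = any(n.startswith('S') for n in node_types)
--             has_entity = any(n.startswith('E') for n in node_types)
--
--             pattern_key = f"{pattern} ({'SUCCESS' if reaches_sentence else 'PARTIAL'})"
--             if has_entity:
--                 pattern_key += " +ENTITY"
--             detailed_patterns[pattern_key] += 1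
--
--     return {
--         'basic_patterns': dict(sorted(patterns.items(), key=lambda x: x[1], reverse=True)),
--         'detailed_patterns': dict(sorted(detailed_patterns.items(), key=lambda x: x[1], reverse=True))
--     }
-- ===== SOURCE B (Python) =====
-- from collections import Counter
--
--
-- def _classify(node):
--     for prefix, tag in (('claim', 'C'), ('word_', 'W'), ('sentence_', 'S'), ('entity_', 'E')):
--         if node.startswith(prefix):
--             return tag
--     return '?'
--
--
-- def analyze_path_patterns(beam_results):
--     # Pass 1: aggregate every path's node-type pattern into one counter.
--     patterns = Counter(
--         '->'.join(_classify(node) for node in path.get('nodes', []))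
--         for result in beam_results
--         for path in result.get('paths', [])
--     )
--     # Pass 2: derive the detailed counts from the unique aggregated patterns
--     # (components are single chars, so substring tests on the pattern suffice).
--     detailed = {}
--     for pattern, count in patterns.items():
--         key = pattern + (' (SUCCESS)' if 'S' in pattern else ' (PARTIAL)')
--         if 'E' in pattern:
--             key += ' +ENTITY'
--         detailed[key] = count
--     return {
--         'basic_patterns': dict(sorted(patterns.items(), key=lambda x: x[1], reverse=True)),
--         'detailed_patterns': dict(sorted(detailed.items(), key=lambda x: x[1], reverse=True)),
--     }
-- ===== Notes on version B (the rewrite author's own statement) =====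
-- stated objective: alternative
-- what changed: B aggregates all paths into one basic-pattern Counter first and then derives each detailed key (SUCCESS/PARTIAL, +ENTITY via membership tests on the pattern string itself) once per unique pattern from that counter, instead of A's recomputing the classification flags and incrementing a second defaultdict for every individual path.
import Mathlib
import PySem

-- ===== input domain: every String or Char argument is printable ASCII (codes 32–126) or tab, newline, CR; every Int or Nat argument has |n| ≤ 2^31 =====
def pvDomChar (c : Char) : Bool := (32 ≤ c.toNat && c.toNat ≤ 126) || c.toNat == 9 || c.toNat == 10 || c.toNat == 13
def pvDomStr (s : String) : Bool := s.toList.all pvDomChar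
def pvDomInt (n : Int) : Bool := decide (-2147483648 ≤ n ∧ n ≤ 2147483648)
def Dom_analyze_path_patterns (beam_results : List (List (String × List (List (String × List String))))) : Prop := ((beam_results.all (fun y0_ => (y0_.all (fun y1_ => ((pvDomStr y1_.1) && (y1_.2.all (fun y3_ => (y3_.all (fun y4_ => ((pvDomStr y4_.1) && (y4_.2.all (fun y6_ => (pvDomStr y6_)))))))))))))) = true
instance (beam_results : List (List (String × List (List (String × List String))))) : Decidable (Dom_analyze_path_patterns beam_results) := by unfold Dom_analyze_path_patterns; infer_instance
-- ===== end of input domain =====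

-- B derives the detailed counts from the aggregated basic-pattern counter (one insert per
-- UNIQUE pattern) instead of recomputing classification flags for every path; alternative
-- decomposition, same exact return value.

-- exact port of Python's 'str + str' (string concatenation on code points)
def pvStrCat (a b : String) : String := String.ofList (a.toList ++ b.toList)

-- ===== PORT A =====
def pvClassifyA (node : String) : String :=
  if PySem.Str.startswith node "claim" then "C"
  else if PySem.Str.startswith node "word_" then "W"
  else if PySem.Str.startswith node "sentence_" then "S"
  else if PySem.Str.startswith node "entity_" then "E"
  else "?"

def pvStepA (st : PySem.Dict String Int × PySem.Dict String Int)
    (path : List (String × List String)) : PySem.Dict String Int × PySem.Dict String Int :=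
  let nodes := (PySem.Dict.mk path).getD "nodes" []
  let node_types := nodes.foldl (fun acc node => acc ++ [pvClassifyA node]) []
  let pattern := PySem.Str.join "->" node_types
  let reaches_sentence := node_types.any (fun n => PySem.Str.startswith n "S")
  let has_entity := node_types.any (fun n => PySem.Str.startswith n "E")
  let pattern_key := pvStrCat pattern (if reaches_sentence then " (SUCCESS)" else " (PARTIAL)")
  let pattern_key := if has_entity then pvStrCat pattern_key " +ENTITY" else pattern_key
  (st.1.modify pattern 0 (· + 1), st.2.modify pattern_key 0 (· + 1))

def analyze_path_patterns (beam_results : List (List (String × List (List (String × List String))))) : List (String × List (String × Int)) :=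
  let st := beam_results.foldl
    (fun st result => ((PySem.Dict.mk result).getD "paths" []).foldl pvStepA st)
    (PySem.Dict.empty, PySem.Dict.empty)
  [("basic_patterns", PySem.List.sorted st.1.items (fun x => x.2) true),
   ("detailed_patterns", PySem.List.sorted st.2.items (fun x => x.2) true)]

-- ===== PORT B =====
def pvClassifyB (node : String) : String :=
  match [("claim", "C"), ("word_", "W"), ("sentence_", "S"), ("entity_", "E")].find?
      (fun pt => PySem.Str.startswith node pt.1) with
  | some pt => pt.2
  | none => "?"

def pvPatternB (path : List (String × List String)) : String :=
  PySem.Str.join "->" (((PySem.Dict.mk path).getD "nodes" []).map pvClassifyB)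

def pvDetailKeyB (pattern : String) : String :=
  let key := pvStrCat pattern (if PySem.Str.isIn "S" pattern then " (SUCCESS)" else " (PARTIAL)")
  if PySem.Str.isIn "E" pattern then pvStrCat key " +ENTITY" else key

def analyze_path_patterns_alt (beam_results : List (List (String × List (List (String × List String))))) : List (String × List (String × Int)) :=
  let patterns := PySem.Dict.counter
    (beam_results.flatMap (fun result => ((PySem.Dict.mk result).getD "paths" []).map pvPatternB))
  let detailed := patterns.items.foldl
    (fun d pc => d.insert (pvDetailKeyB pc.1) pc.2) PySem.Dict.empty
  [("basic_patterns", PySem.List.sorted patterns.items (fun x => x.2) true),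
   ("detailed_patterns", PySem.List.sorted detailed.items (fun x => x.2) true)]

-- ===== PRECONDITION & SPEC =====
def Spec_analyze_path_patterns (beam_results : List (List (String × List (List (String × List String))))) (out : List (String × List (String × Int))) : Prop := out = analyze_path_patterns_alt beam_results
instance (beam_results : List (List (String × List (List (String × List String))))) (out : List (String × List (String × Int))) : Decidable (Spec_analyze_path_patterns beam_results out) := by unfold Spec_analyze_path_patterns; infer_instance

-- ===== CLAIM (what is proved, stated in full; the proofs are below) =====
def Claim_equal_analyze_path_patterns : Prop := ∀ (beam_results : List (List (String × List (List (String × List String))))), Dom_analyze_path_patterns beam_results → Spec_analyze_path_patterns beam_results (analyze_path_patterns beam_results)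

-- ===== LEMMAS AND PROOFS =====

-- proof-side abbreviations for A's per-path pattern and detailed key
def pvPathsOf (result : List (String × List (List (String × List String)))) :
    List (List (String × List String)) := (PySem.Dict.mk result).getD "paths" []

def pvTypesA (path : List (String × List String)) : List String :=
  ((PySem.Dict.mk path).getD "nodes" []).map pvClassifyA

def pvPatA (path : List (String × List String)) : String :=
  PySem.Str.join "->" (pvTypesA path)

def pvDKeyA (path : List (String × List String)) : String :=
  let key := pvStrCat (pvPatA path)
    (if (pvTypesA path).any (fun n => PySem.Str.startswith n "S") then " (SUCCESS)" else " (PARTIAL)")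
  if (pvTypesA path).any (fun n => PySem.Str.startswith n "E") then pvStrCat key " +ENTITY" else key

def pvIsType (t : String) : Prop := t = "C" ∨ t = "W" ∨ t = "S" ∨ t = "E" ∨ t = "?"

lemma classifyA_isType (n : String) : pvIsType (pvClassifyA n) := by
  unfold pvClassifyA pvIsType; split_ifs <;> simp

lemma typesA_isType (p : List (String × List String)) : ∀ t ∈ pvTypesA p, pvIsType t := by
  intro t ht
  obtain ⟨n, _, rfl⟩ := List.mem_map.mp ht
  exact classifyA_isType n

lemma classifyB_eq (n : String) : pvClassifyB n = pvClassifyA n := by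
  unfold pvClassifyB pvClassifyA
  split_ifs <;> simp_all [List.find?]

lemma patternB_eq (p : List (String × List String)) : pvPatternB p = pvPatA p := by
  unfold pvPatternB pvPatA pvTypesA
  rw [funext classifyB_eq]

lemma stepA_eq (st : PySem.Dict String Int × PySem.Dict String Int)
    (p : List (String × List String)) :
    pvStepA st p = (st.1.modify (pvPatA p) 0 (· + 1), st.2.modify (pvDKeyA p) 0 (· + 1)) := by
  simp only [pvStepA, pvDKeyA, pvPatA, pvTypesA,
    PySem.List.foldl_append_singleton_eq_map, List.nil_append]
  rfl

-- membership of a single type character in the joined pattern string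
lemma mem_join_of_types (c : Char) (s : String)
    (hct : ∀ t, pvIsType t → (c ∈ t.toList ↔ t = s)) (hc1 : c ≠ '-') (hc2 : c ≠ '>') :
    ∀ (ts : List String), (∀ t ∈ ts, pvIsType t) →
      (c ∈ PySem.Chars.join ['-', '>'] (ts.map String.toList) ↔ s ∈ ts) := by
  intro ts
  induction ts with
  | nil => intro _; simp [PySem.Chars.join_nil]
  | cons t rest ih =>
    intro h
    cases rest with
    | nil =>
      have h1 := hct t (h t (by simp))
      simp [PySem.Chars.join_singleton, h1, eq_comm]
    | cons u r =>
      have h1 := hct t (h t (by simp))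
      have h2 := ih (fun v hv => h v (List.mem_cons_of_mem _ hv))
      rw [List.map_cons, List.map_cons, PySem.Chars.join_cons_cons]
      simp only [List.map_cons] at h2
      constructor
      · intro hm
        rcases List.mem_append.mp hm with hm1 | hm2
        · rcases List.mem_append.mp hm1 with ha | hb
          · exact List.mem_cons.mpr (Or.inl (h1.mp ha).symm)
          · rcases (by simpa using hb : c = '-' ∨ c = '>') with rfl | rfl
            · exact absurd rfl hc1
            · exact absurd rfl hc2
        · exact List.mem_cons_of_mem _ (h2.mp hm2)
      · intro hm
        rcases List.mem_cons.mp hm with rfl | hm'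
        · exact List.mem_append.mpr (Or.inl (List.mem_append.mpr (Or.inl (h1.mpr rfl))))
        · exact List.mem_append.mpr (Or.inr (h2.mpr hm'))

lemma no_space_join (ts : List String) (h : ∀ t ∈ ts, pvIsType t) :
    ' ' ∉ (PySem.Str.join "->" ts).toList := by
  intro hmem
  rw [PySem.Str.toList_join] at hmem
  have hct : ∀ t, pvIsType t → (' ' ∈ t.toList ↔ t = " ") := by
    intro t ht; rcases ht with rfl | rfl | rfl | rfl | rfl <;> simp
  have : (" " : String) ∈ ts :=
    (mem_join_of_types ' ' " " hct (by decide) (by decide) ts h).mp (by simpa using hmem)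
  rcases h " " this with h' | h' | h' | h' | h' <;> simp at h'

lemma startswith_type (t : String) (ht : pvIsType t) (s : String)
    (hst : pvIsType s) :
    PySem.Str.startswith t s = (t == s) := by
  rcases ht with rfl | rfl | rfl | rfl | rfl <;>
    rcases hst with rfl | rfl | rfl | rfl | rfl <;> decide

lemma flag_eq (c : Char) (s : String) (hs : s.toList = [c]) (hst : pvIsType s)
    (hct : ∀ t, pvIsType t → (c ∈ t.toList ↔ t = s)) (hc1 : c ≠ '-') (hc2 : c ≠ '>')
    (ts : List String) (h : ∀ t ∈ ts, pvIsType t) :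
    ts.any (fun n => PySem.Str.startswith n s) = PySem.Str.isIn s (PySem.Str.join "->" ts) := by
  rw [Bool.eq_iff_iff, List.any_eq_true]
  have hbr : PySem.Str.isIn s (PySem.Str.join "->" ts)
      = PySem.Chars.isIn s.toList (PySem.Str.join "->" ts).toList := by simp
  rw [hbr, PySem.Chars.isIn_iff_infix, hs, List.singleton_infix_iff,
    PySem.Str.toList_join]
  have hj : ("->" : String).toList = ['-', '>'] := rfl
  rw [hj, mem_join_of_types c s hct hc1 hc2 ts h]
  constructor
  · rintro ⟨t, htm, hsw⟩
    rw [startswith_type t (h t htm) s hst] at hsw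
    exact (beq_iff_eq.mp hsw) ▸ htm
  · intro hmem
    exact ⟨s, hmem, by rw [startswith_type s hst s hst]; simp⟩

lemma dkeyA_eq (p : List (String × List String)) : pvDKeyA p = pvDetailKeyB (pvPatA p) := by
  have hS := flag_eq 'S' "S" rfl (by simp [pvIsType])
    (by intro t ht; rcases ht with rfl | rfl | rfl | rfl | rfl <;> simp)
    (by decide) (by decide) (pvTypesA p) (typesA_isType p)
  have hE := flag_eq 'E' "E" rfl (by simp [pvIsType])
    (by intro t ht; rcases ht with rfl | rfl | rfl | rfl | rfl <;> simp)
    (by decide) (by decide) (pvTypesA p) (typesA_isType p)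
  simp only [pvDKeyA, pvDetailKeyB, pvPatA] at *
  rw [hS, hE]
  rfl

lemma no_space_patA (p : List (String × List String)) : ' ' ∉ (pvPatA p).toList :=
  no_space_join (pvTypesA p) (typesA_isType p)

lemma append_cancel_space : ∀ (l1 l2 s1 s2 : List Char), l1 ++ (' ' :: s1) = l2 ++ (' ' :: s2) →
    ' ' ∉ l1 → ' ' ∉ l2 → l1 = l2 := by
  intro l1
  induction l1 with
  | nil =>
    intro l2 s1 s2 heq _ hl2
    cases l2 with
    | nil => rfl
    | cons b t =>
      simp only [List.nil_append, List.cons_append, List.cons.injEq] at heq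
      exact absurd (heq.1 ▸ List.mem_cons_self) hl2
  | cons a t ih =>
    intro l2 s1 s2 heq hl1 hl2
    cases l2 with
    | nil =>
      simp only [List.nil_append, List.cons_append, List.cons.injEq] at heq
      exact absurd (heq.1.symm ▸ List.mem_cons_self) hl1
    | cons b u =>
      simp only [List.cons_append, List.cons.injEq] at heq
      rw [heq.1, ih u s1 s2 heq.2 (fun hm => hl1 (List.mem_cons_of_mem _ hm))
        (fun hm => hl2 (List.mem_cons_of_mem _ hm))]

lemma dkeyB_toList (p : String) : ∃ suf, (pvDetailKeyB p).toList = p.toList ++ (' ' :: suf) := by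
  unfold pvDetailKeyB pvStrCat
  split_ifs <;> simp

lemma dkeyB_inj (p q : String) (hp : ' ' ∉ p.toList) (hq : ' ' ∉ q.toList)
    (h : pvDetailKeyB p = pvDetailKeyB q) : p = q := by
  obtain ⟨s1, h1⟩ := dkeyB_toList p
  obtain ⟨s2, h2⟩ := dkeyB_toList q
  have : p.toList ++ (' ' :: s1) = q.toList ++ (' ' :: s2) := by rw [← h1, ← h2, h]
  exact String.toList_inj.mp (append_cancel_space _ _ _ _ this hp hq)

lemma ofList_map_inj {α β : Type} [DecidableEq α] [DecidableEq β] (f : α → β) :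
    ∀ (xs : List α), (∀ x ∈ xs, ∀ y ∈ xs, f x = f y → x = y) →
      PySem.Set.ofList (xs.map f) = (PySem.Set.ofList xs).map f := by
  intro xs
  induction xs using List.reverseRecOn with
  | nil => intro _; simp
  | append_singleton xs x ih =>
    intro hinj
    rw [List.map_append, List.map_singleton, PySem.Set.ofList_append_singleton,
      PySem.Set.ofList_append_singleton,
      ih (fun a ha b hb => hinj a (by simp [ha]) b (by simp [hb])),
      PySem.Set.add_eq_ite, PySem.Set.add_eq_ite]
    have hmem : f x ∈ (PySem.Set.ofList xs).map f ↔ x ∈ PySem.Set.ofList xs := by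
      constructor
      · intro hm
        obtain ⟨z, hz, hfz⟩ := List.mem_map.mp hm
        have hzx : z = x := hinj z (by simp [(PySem.Set.mem_ofList _ _).mp hz]) x (by simp) hfz
        exact hzx ▸ hz
      · exact fun hm => List.mem_map_of_mem hm
    rw [if_congr hmem rfl rfl]
    split_ifs with hx
    · rfl
    · rw [List.map_append, List.map_singleton]

lemma count_map_inj {α β : Type} [DecidableEq α] [DecidableEq β] (f : α → β) (xs : List α)
    (hinj : ∀ x ∈ xs, ∀ y ∈ xs, f x = f y → x = y) (k : α) (hk : k ∈ xs) :
    (xs.map f).count (f k) = xs.count k := by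
  rw [List.count_eq_countP, List.count_eq_countP, List.countP_map]
  apply List.countP_congr
  intro x hx
  by_cases hxk : x = k
  · subst hxk; simp
  · have : ¬ f x = f k := fun hfe => hxk (hinj x hx k hk hfe)
    simp [Function.comp, beq_iff_eq, hxk, this]

lemma counter_map_inj_items (f : String → String) (xs : List String)
    (hinj : ∀ x ∈ xs, ∀ y ∈ xs, f x = f y → x = y) :
    (PySem.Dict.counter (xs.map f)).items =
      (((PySem.Dict.counter xs).items).foldl
        (fun d pc => d.insert (f pc.1) pc.2) (PySem.Dict.empty (κ := String) (ν := Int))).items := by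
  have hofl : PySem.Set.ofList (xs.map f) = (PySem.Set.ofList xs).map f := ofList_map_inj f xs hinj
  have hfresh := PySem.Dict.items_foldl_insert_fresh
    (l := (PySem.Dict.counter xs).items) (d := (PySem.Dict.empty (κ := String) (ν := Int)))
    (k := fun pc => f pc.1) (v := fun pc => pc.2)
    (by intro a _; simp [PySem.Dict.contains_empty])
    (by
      have : ((PySem.Dict.counter xs).items.map fun pc => f pc.1)
          = (PySem.Set.ofList xs).map f := by
        rw [PySem.Dict.items_counter]
        simp [List.map_map, Function.comp]
      rw [this]
      exact List.Nodup.map_on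
        (fun a ha b hb hfe => hinj a ((PySem.Set.mem_ofList _ _).mp ha) b ((PySem.Set.mem_ofList _ _).mp hb) hfe)
        (PySem.Set.nodup_ofList xs))
  rw [hfresh, PySem.Dict.items_counter, PySem.Dict.items_counter, hofl]
  have hemp : (PySem.Dict.empty (κ := String) (ν := Int)).items = [] := rfl
  rw [hemp, List.nil_append, List.map_map, List.map_map]
  apply List.map_congr_left
  intro k hk
  simp only [Function.comp_apply]
  rw [count_map_inj f xs hinj k ((PySem.Set.mem_ofList _ _).mp hk)]

-- ===== VERDICT (by name: the statement is the Claim_ definition above) =====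
theorem analyze_path_patterns_spec : Claim_equal_analyze_path_patterns := by
  intro br _
  unfold Spec_analyze_path_patterns analyze_path_patterns analyze_path_patterns_alt
  have hflat : br.foldl
      (fun st result => ((PySem.Dict.mk result).getD "paths" []).foldl pvStepA st)
      ((PySem.Dict.empty : PySem.Dict String Int), (PySem.Dict.empty : PySem.Dict String Int))
      = (br.flatMap pvPathsOf).foldl pvStepA
        ((PySem.Dict.empty : PySem.Dict String Int), (PySem.Dict.empty : PySem.Dict String Int)) := by
    rw [List.foldl_flatMap]
    rfl
  have hstep : (br.flatMap pvPathsOf).foldl pvStepA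
      ((PySem.Dict.empty : PySem.Dict String Int), (PySem.Dict.empty : PySem.Dict String Int))
      = (br.flatMap pvPathsOf).foldl
        (fun st p => (st.1.modify (pvPatA p) 0 (· + 1), st.2.modify (pvDKeyA p) 0 (· + 1)))
        (PySem.Dict.empty, PySem.Dict.empty) :=
    PySem.List.foldl_congr_mem _ _ _ _ (fun acc p _ => stepA_eq acc p)
  rw [hflat, hstep,
    PySem.List.foldl_prod_mk (f := fun d p => PySem.Dict.modify d (pvPatA p) 0 (· + 1))
      (g := fun d p => PySem.Dict.modify d (pvDKeyA p) 0 (· + 1))]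
  have hcnt1 : (br.flatMap pvPathsOf).foldl
      (fun d p => PySem.Dict.modify d (pvPatA p) 0 (· + 1)) PySem.Dict.empty
      = PySem.Dict.counter ((br.flatMap pvPathsOf).map pvPatA) := by
    rw [PySem.Dict.counter_eq_foldl, List.foldl_map]
  have hcnt2 : (br.flatMap pvPathsOf).foldl
      (fun d p => PySem.Dict.modify d (pvDKeyA p) 0 (· + 1)) PySem.Dict.empty
      = PySem.Dict.counter ((br.flatMap pvPathsOf).map pvDKeyA) := by
    rw [PySem.Dict.counter_eq_foldl, List.foldl_map]
  have hBpat : br.flatMap (fun result => ((PySem.Dict.mk result).getD "paths" []).map pvPatternB)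
      = (br.flatMap pvPathsOf).map pvPatA := by
    simp only [pvPathsOf, List.map_flatMap]
    have hfun : pvPatternB = pvPatA := funext patternB_eq
    rw [hfun]
  have hinj : ∀ x ∈ (br.flatMap pvPathsOf).map pvPatA, ∀ y ∈ (br.flatMap pvPathsOf).map pvPatA,
      pvDetailKeyB x = pvDetailKeyB y → x = y := by
    intro x hx y hy hfe
    obtain ⟨p, _, rfl⟩ := List.mem_map.mp hx
    obtain ⟨q, _, rfl⟩ := List.mem_map.mp hy
    exact dkeyB_inj _ _ (no_space_patA p) (no_space_patA q) hfe
  have hdkey : (br.flatMap pvPathsOf).map pvDKeyA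
      = ((br.flatMap pvPathsOf).map pvPatA).map pvDetailKeyB := by
    rw [List.map_map]
    exact List.map_congr_left (fun p _ => dkeyA_eq p)
  rw [hcnt1, hcnt2, hBpat, hdkey]
  dsimp only
  rw [counter_map_inj_items pvDetailKeyB _ hinj]
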